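-- pv_equiv track=rewrite | github.com/t1ooo/geeksforgeeks | mos-algorithm-query-square-root-decomposition-set-1-introduction/main.py | solveQueriesV2
-- ===== SOURCE A (Python) =====
-- def solveQueriesV2(nums, queries, k):
--     d = [dict() for _ in range(len(queries))]
--     for n, num in enumerate(nums):
--         for i, (l, r) in enumerate(queries):
--             if l <= n+1 and n+1 <= r:
--                 if num not in d[i]:
--                     d[i][num] = 0
--                 d[i][num] += 1
--
--     res = [0] * len(queries)
--     for i, v in enumerate(d):
--         for num, count in v.items():
--             if k <= count:
--                 res[i] += 1
--
--     return res
-- ===== SOURCE B (Python) =====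
-- def solveQueriesV2(nums, queries, k):
--     res = []
--     for l, r in queries:
--         counts = {}
--         for x in nums[max(l - 1, 0):max(r, 0)]:
--             counts[x] = counts.get(x, 0) + 1
--         res.append(sum(1 for c in counts.values() if k <= c))
--     return res
-- ===== Notes on version B (the rewrite author's own statement) =====
-- stated objective: faster
-- what changed: Instead of scanning every element against every query in a nested loop that maintains one dict per query followed by a second counting pass, B processes each query independently: it slices out exactly the in-range elements, counts their frequencies in one dict, and emits the number of values with count >= k directly.
import Mathlib
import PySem

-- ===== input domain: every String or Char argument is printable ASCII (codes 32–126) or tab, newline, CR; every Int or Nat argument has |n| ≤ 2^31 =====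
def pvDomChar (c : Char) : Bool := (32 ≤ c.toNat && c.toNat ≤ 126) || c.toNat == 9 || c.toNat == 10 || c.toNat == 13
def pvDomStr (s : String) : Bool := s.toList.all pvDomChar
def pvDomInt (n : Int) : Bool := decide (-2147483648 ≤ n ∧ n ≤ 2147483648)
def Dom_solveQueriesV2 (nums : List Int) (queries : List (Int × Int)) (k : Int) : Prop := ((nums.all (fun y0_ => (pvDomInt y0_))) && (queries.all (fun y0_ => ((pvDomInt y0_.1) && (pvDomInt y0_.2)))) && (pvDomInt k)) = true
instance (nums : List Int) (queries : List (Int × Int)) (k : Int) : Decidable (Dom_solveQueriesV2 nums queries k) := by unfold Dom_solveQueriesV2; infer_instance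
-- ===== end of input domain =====

-- B replaces A's per-element scan over every query (one dict per query maintained in lockstep,
-- then a second counting pass) by one independent slice-and-count per query; measured faster.

-- ===== PORT A =====
def solveQueriesV2 (nums : List Int) (queries : List (Int × Int)) (k : Int) : List Int :=
  -- d = [dict() for _ in range(len(queries))]
  let d0 : List (PySem.Dict Int Int) :=
    (PySem.List.pyRange 0 queries.length 1).map (fun _ => PySem.Dict.empty)
  -- for n, num in enumerate(nums): for i, (l, r) in enumerate(queries): …
  let d := (PySem.List.enumerate nums).foldl (fun d nx =>
    (PySem.List.enumerate queries).foldl (fun d iq =>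
      if iq.2.1 ≤ nx.1 + 1 ∧ nx.1 + 1 ≤ iq.2.2 then
        -- if num not in d[i]: d[i][num] = 0
        -- d[i][num] += 1
        let di := PySem.List.pyGetD d iq.1 PySem.Dict.empty
        let di := if di.contains nx.2 then di else di.insert nx.2 0
        PySem.List.pySetD d iq.1 (di.insert nx.2 (di.getD nx.2 0 + 1))
      else d) d) d0
  -- res = [0] * len(queries); for i, v in enumerate(d): for num, count in v.items(): …
  let res0 : List Int := List.replicate queries.length 0
  (PySem.List.enumerate d).foldl (fun res iv =>
    iv.2.items.foldl (fun res nc =>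
      if k ≤ nc.2 then PySem.List.pySetD res iv.1 (PySem.List.pyGetD res iv.1 0 + 1) else res)
      res) res0

-- ===== PORT B =====
def solveQueriesV2_alt (nums : List Int) (queries : List (Int × Int)) (k : Int) : List Int :=
  queries.foldl (fun res lr =>
    -- counts = {}; for x in nums[max(l-1,0):max(r,0)]: counts[x] = counts.get(x, 0) + 1
    let seg := PySem.List.slice nums (some (max (lr.1 - 1) 0)) (some (max lr.2 0))
    let counts := seg.foldl (fun d x => d.insert x (d.getD x 0 + 1))
      (PySem.Dict.empty : PySem.Dict Int Int)
    -- res.append(sum(1 for c in counts.values() if k <= c))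
    res ++ [counts.values.foldl (fun acc c => if k ≤ c then acc + 1 else acc) 0]) []

-- ===== PRECONDITION & SPEC =====
def Spec_solveQueriesV2 (nums : List Int) (queries : List (Int × Int)) (k : Int) (out : List Int) : Prop := out = solveQueriesV2_alt nums queries k
instance (nums : List Int) (queries : List (Int × Int)) (k : Int) (out : List Int) : Decidable (Spec_solveQueriesV2 nums queries k out) := by unfold Spec_solveQueriesV2; infer_instance

-- ===== CLAIM (what is proved, stated in full; the proofs are below) =====
def Claim_equal_solveQueriesV2 : Prop := ∀ (nums : List Int) (queries : List (Int × Int)) (k : Int), Dom_solveQueriesV2 nums queries k → Spec_solveQueriesV2 nums queries k (solveQueriesV2 nums queries k)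

-- ===== LEMMAS AND PROOFS =====

-- A fold over `enumerate qs` whose step touches exactly the cell at its index acts as a zipWith.
theorem foldl_enumerate_update {Q D : Type}
    (G : List D → Int × Q → List D) (u : Q → D → D)
    (hG : ∀ (i : Int) (q : Q) (pre : List D) (a : D) (rest : List D),
      i = (pre.length : Int) → G (pre ++ a :: rest) (i, q) = pre ++ u q a :: rest) :
    ∀ (qs : List Q) (pre rest : List D), rest.length = qs.length →
    (PySem.List.enumerate qs (pre.length : Int)).foldl G (pre ++ rest)
      = pre ++ List.zipWith u qs rest := by
  intro qs
  induction qs with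
  | nil =>
    intro pre rest h
    have : rest = [] := List.length_eq_zero_iff.mp h
    subst this
    simp [PySem.List.enumerate_nil]
  | cons q qs ih =>
    intro pre rest h
    cases rest with
    | nil => simp at h
    | cons r0 rest' =>
      rw [PySem.List.enumerate_cons, List.foldl_cons,
        hG _ q pre r0 rest' rfl]
      have h1 : ((pre.length : Int) + 1) = (((pre ++ [u q r0]).length : Nat) : Int) := by
        simp
      have h2 : pre ++ u q r0 :: rest' = (pre ++ [u q r0]) ++ rest' := by simp
      rw [h1, h2, ih (pre ++ [u q r0]) rest' (by simpa using h)]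
      simp

-- Folding a per-element zipWith update over xs, from a map initial state, is a map of folds.
theorem foldl_zipWith_map {X Q D : Type} (step : X → Q → D → D) :
    ∀ (xs : List X) (qs : List Q) (f : Q → D),
    xs.foldl (fun d x => List.zipWith (fun q di => step x q di) qs d) (qs.map f)
      = qs.map (fun q => xs.foldl (fun di x => step x q di) (f q)) := by
  intro xs
  induction xs with
  | nil => intro qs f; rfl
  | cons x xs ih =>
    intro qs f
    rw [List.foldl_cons, List.zipWith_map_right, List.zipWith_self, ih qs (fun q => step x q (f q))]
    simp

-- Python's `if num not in d: d[num] = 0; d[num] += 1` is a plain counter increment.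
theorem upd_eq_insert (di : PySem.Dict Int Int) (num : Int) :
    ((if di.contains num = true then di else di.insert num 0).insert num
        ((if di.contains num = true then di else di.insert num 0).getD num 0 + 1))
      = di.insert num (di.getD num 0 + 1) := by
  by_cases h : di.contains num = true
  · simp [h]
  · rw [if_neg h, PySem.Dict.insert_insert_self, PySem.Dict.getD_insert_self,
      PySem.Dict.getD_of_not_contains di 0 (by simpa using h)]

-- The elements of nums whose 1-based position lies in [l, r] are exactly the Python slice.
theorem filter_enumerate_range (l r : Int) :
    ∀ (nums : List Int) (s : Nat),
    (((PySem.List.enumerate nums (s : Int)).filter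
        (fun nx => decide (l ≤ nx.1 + 1 ∧ nx.1 + 1 ≤ r))).map (·.2))
      = (nums.take ((max r 0).toNat - s)).drop ((max (l - 1) 0).toNat - s) := by
  intro nums
  induction nums with
  | nil => intro s; simp [PySem.List.enumerate_nil]
  | cons x xs ih =>
    intro s
    rw [PySem.List.enumerate_cons, List.filter_cons]
    have hs : ((s : Int) + 1) = (((s + 1 : Nat) : Int)) := by push_cast; ring
    by_cases hc : l ≤ (s : Int) + 1 ∧ (s : Int) + 1 ≤ r
    · obtain ⟨hc1, hc2⟩ := hc
      rw [if_pos (by simp; omega), List.map_cons, hs, ih (s + 1)]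
      have hA : (max (l - 1) 0).toNat - s = 0 := by omega
      have hA' : (max (l - 1) 0).toNat - (s + 1) = 0 := by omega
      have hB : (max r 0).toNat - s = ((max r 0).toNat - (s + 1)) + 1 := by omega
      rw [hA, hA', List.drop_zero, List.drop_zero, hB, List.take_succ_cons]
    · rw [if_neg (by simp; omega), hs, ih (s + 1)]
      by_cases hr : (s : Int) + 1 ≤ r
      · -- the window has not started yet: l - 1 > s
        have hA : (max (l - 1) 0).toNat - s = ((max (l - 1) 0).toNat - (s + 1)) + 1 := by omega
        have hB : (max r 0).toNat - s = ((max r 0).toNat - (s + 1)) + 1 := by omega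
        rw [hA, hB, List.take_succ_cons, List.drop_succ_cons]
      · -- the window has ended: nothing is taken on either side
        have hA : (max r 0).toNat - s = 0 := by omega
        have hB : (max r 0).toNat - (s + 1) = 0 := by omega
        simp [hA, hB]

-- The per-index result of A's second pass: a scalar count of dict entries with count ≥ k.
theorem res_inner_fold (k : Int) (items : List (Int × Int)) :
    ∀ (pre : List Int) (a : Int) (rest : List Int),
    items.foldl (fun res nc =>
        if k ≤ nc.2 then
          PySem.List.pySetD res (pre.length : Int)
            (PySem.List.pyGetD res (pre.length : Int) 0 + 1)
        else res) (pre ++ a :: rest)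
      = pre ++ (items.foldl (fun acc nc => if k ≤ nc.2 then acc + 1 else acc) a) :: rest := by
  induction items with
  | nil => intro pre a rest; rfl
  | cons nc items ih =>
    intro pre a rest
    by_cases h : k ≤ nc.2
    · simp only [List.foldl_cons, h, if_true]
      rw [show PySem.List.pyGetD (pre ++ a :: rest) (pre.length : Int) 0 = a by
            simp [List.getD],
          show PySem.List.pySetD (pre ++ a :: rest) (pre.length : Int) (a + 1)
              = pre ++ (a + 1) :: rest by simp,
          ih pre (a + 1) rest]
    · simp only [List.foldl_cons, h, if_false, ih pre a rest]

-- Counting over items versus over values is the same fold.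
theorem count_values_eq_items (k : Int) (d : PySem.Dict Int Int) :
    d.values.foldl (fun acc c => if k ≤ c then acc + 1 else acc) (0 : Int)
      = d.items.foldl (fun acc nc => if k ≤ nc.2 then acc + 1 else acc) (0 : Int) := by
  rw [PySem.Dict.values, List.foldl_map]

theorem zipWith_replicate_eq_map {D E F : Type} (u : D → E → F) (e : E) :
    ∀ (d : List D) (n : Nat), d.length ≤ n →
      List.zipWith u d (List.replicate n e) = d.map (fun v => u v e) := by
  intro d
  induction d with
  | nil => intro n _; rfl
  | cons v d ih =>
    intro n hn
    cases n with
    | zero => simp at hn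
    | succ m => simp [List.replicate_succ, ih m (by simpa using hn)]

-- The effective per-element, per-query update of A's first loop.
def stepW (nx : Int × Int) (q : Int × Int) (di : PySem.Dict Int Int) : PySem.Dict Int Int :=
  if q.1 ≤ nx.1 + 1 ∧ nx.1 + 1 ≤ q.2 then di.insert nx.2 (di.getD nx.2 0 + 1) else di

-- ===== VERDICT (by name: the statement is the Claim_ definition above) =====
theorem solveQueriesV2_spec : Claim_equal_solveQueriesV2 := by
  intro nums queries k _
  unfold Spec_solveQueriesV2 solveQueriesV2 solveQueriesV2_alt
  dsimp only
  rw [PySem.List.foldl_append_singleton_eq_map]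
  have hinner : ∀ (nx : Int × Int) (d : List (PySem.Dict Int Int)),
      d.length = queries.length →
      List.foldl
        (fun d iq =>
          if iq.2.1 ≤ nx.1 + 1 ∧ nx.1 + 1 ≤ iq.2.2 then
            PySem.List.pySetD d iq.1
              ((if (PySem.List.pyGetD d iq.1 PySem.Dict.empty).contains nx.2 = true then
                    PySem.List.pyGetD d iq.1 PySem.Dict.empty
                  else (PySem.List.pyGetD d iq.1 PySem.Dict.empty).insert nx.2 0).insert
                nx.2
                ((if (PySem.List.pyGetD d iq.1 PySem.Dict.empty).contains nx.2 = true then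
                        PySem.List.pyGetD d iq.1 PySem.Dict.empty
                      else (PySem.List.pyGetD d iq.1 PySem.Dict.empty).insert nx.2 0).getD
                    nx.2 0 + 1))
          else d)
        d (PySem.List.enumerate queries)
      = List.zipWith (fun q di => stepW nx q di) queries d := by
    intro nx d hlen
    have h := foldl_enumerate_update
      (G := fun d iq =>
        if iq.2.1 ≤ nx.1 + 1 ∧ nx.1 + 1 ≤ iq.2.2 then
          PySem.List.pySetD d iq.1
            ((if (PySem.List.pyGetD d iq.1 PySem.Dict.empty).contains nx.2 = true then
                  PySem.List.pyGetD d iq.1 PySem.Dict.empty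
                else (PySem.List.pyGetD d iq.1 PySem.Dict.empty).insert nx.2 0).insert
              nx.2
              ((if (PySem.List.pyGetD d iq.1 PySem.Dict.empty).contains nx.2 = true then
                      PySem.List.pyGetD d iq.1 PySem.Dict.empty
                    else (PySem.List.pyGetD d iq.1 PySem.Dict.empty).insert nx.2 0).getD
                  nx.2 0 + 1))
        else d)
      (u := fun q di => stepW nx q di)
      (by
        intro i q pre a rest hi
        subst hi
        dsimp only [stepW]
        have hget : PySem.List.pyGetD (pre ++ a :: rest) ((pre.length : Nat) : Int)
            PySem.Dict.empty = a := by simp [List.getD]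
        rw [hget, upd_eq_insert a nx.2]
        by_cases hc : q.1 ≤ nx.1 + 1 ∧ nx.1 + 1 ≤ q.2
        · rw [if_pos hc, if_pos hc]
          simp
        · rw [if_neg hc, if_neg hc])
      queries [] d (by simpa using hlen)
    simpa only [List.length_nil, Nat.cast_zero, List.nil_append] using h
  have houter : ∀ (es : List (Int × Int)) (dst : List (PySem.Dict Int Int)),
      dst.length = queries.length →
      List.foldl
        (fun d nx =>
          List.foldl
            (fun d iq =>
              if iq.2.1 ≤ nx.1 + 1 ∧ nx.1 + 1 ≤ iq.2.2 then
                PySem.List.pySetD d iq.1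
                  ((if (PySem.List.pyGetD d iq.1 PySem.Dict.empty).contains nx.2 = true then
                        PySem.List.pyGetD d iq.1 PySem.Dict.empty
                      else (PySem.List.pyGetD d iq.1 PySem.Dict.empty).insert nx.2 0).insert
                    nx.2
                    ((if (PySem.List.pyGetD d iq.1 PySem.Dict.empty).contains nx.2 = true then
                            PySem.List.pyGetD d iq.1 PySem.Dict.empty
                          else (PySem.List.pyGetD d iq.1 PySem.Dict.empty).insert nx.2 0).getD
                        nx.2 0 + 1))
              else d)
            d (PySem.List.enumerate queries))
        dst es
      = List.foldl (fun d nx => List.zipWith (fun q di => stepW nx q di) queries d) dst es := by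
    intro es
    induction es with
    | nil => intro dst _; rfl
    | cons e es ih =>
      intro dst hdst
      rw [List.foldl_cons, List.foldl_cons, hinner e dst hdst]
      exact ih _ (by simp [hdst])
  rw [houter (PySem.List.enumerate nums) _
    (by simp [PySem.List.length_pyRange_one])]
  have hd0 : (List.map (fun (_ : Int) => (PySem.Dict.empty : PySem.Dict Int Int))
      (PySem.List.pyRange 0 (queries.length : Int) 1))
      = queries.map (fun _ => PySem.Dict.empty) := by
    apply List.ext_getElem <;> simp [PySem.List.length_pyRange_one]
  rw [hd0, foldl_zipWith_map stepW (PySem.List.enumerate nums) queries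
    (fun _ => PySem.Dict.empty)]
  rw [List.nil_append]
  have hres := foldl_enumerate_update
    (G := fun res iv =>
      List.foldl
        (fun res nc =>
          if k ≤ nc.2 then
            PySem.List.pySetD res iv.1 (PySem.List.pyGetD res iv.1 0 + 1)
          else res) res iv.2.items)
    (u := fun (v : PySem.Dict Int Int) (a : Int) =>
      v.items.foldl (fun acc nc => if k ≤ nc.2 then acc + 1 else acc) a)
    (by
      intro i q pre a rest hi
      subst hi
      exact res_inner_fold k q.items pre a rest)
    (List.map (fun q => List.foldl (fun di x => stepW x q di) PySem.Dict.empty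
        (PySem.List.enumerate nums)) queries)
    [] (List.replicate queries.length 0) (by simp)
  simp only [List.length_nil, Nat.cast_zero, List.nil_append] at hres
  rw [hres, zipWith_replicate_eq_map _ _ _ queries.length (by simp), List.map_map]
  refine List.map_congr_left fun q _ => ?_
  dsimp only [Function.comp_apply]
  have hdict :
      List.foldl (fun di x => stepW x q di) PySem.Dict.empty (PySem.List.enumerate nums)
      = List.foldl (fun d x => d.insert x (d.getD x 0 + 1)) PySem.Dict.empty
          (PySem.List.slice nums (some (max (q.1 - 1) 0)) (some (max q.2 0))) := by
    have hstep : (fun (di : PySem.Dict Int Int) (nx : Int × Int) => stepW nx q di)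
        = (fun di nx =>
            if (decide (q.1 ≤ nx.1 + 1 ∧ nx.1 + 1 ≤ q.2)) = true
            then di.insert nx.2 (di.getD nx.2 0 + 1) else di) := by
      funext di nx
      by_cases h : q.1 ≤ nx.1 + 1 ∧ nx.1 + 1 ≤ q.2
      · rw [stepW, if_pos h, if_pos (by simpa using h)]
      · rw [stepW, if_neg h, if_neg (by simpa using h)]
    rw [hstep]
    have hfil :
        List.foldl (fun (di : PySem.Dict Int Int) (nx : Int × Int) =>
            if (decide (q.1 ≤ nx.1 + 1 ∧ nx.1 + 1 ≤ q.2)) = true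
            then di.insert nx.2 (di.getD nx.2 0 + 1) else di)
          PySem.Dict.empty (PySem.List.enumerate nums)
        = List.foldl (fun (di : PySem.Dict Int Int) (nx : Int × Int) =>
              di.insert nx.2 (di.getD nx.2 0 + 1))
            PySem.Dict.empty
            ((PySem.List.enumerate nums).filter
              (fun nx => decide (q.1 ≤ nx.1 + 1 ∧ nx.1 + 1 ≤ q.2))) :=
      List.foldl_filter.symm
    have hmap :
        List.foldl (fun (di : PySem.Dict Int Int) (nx : Int × Int) =>
              di.insert nx.2 (di.getD nx.2 0 + 1))
            PySem.Dict.empty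
            ((PySem.List.enumerate nums).filter
              (fun nx => decide (q.1 ≤ nx.1 + 1 ∧ nx.1 + 1 ≤ q.2)))
        = List.foldl (fun (d : PySem.Dict Int Int) (x : Int) => d.insert x (d.getD x 0 + 1))
            PySem.Dict.empty
            (((PySem.List.enumerate nums).filter
                (fun nx => decide (q.1 ≤ nx.1 + 1 ∧ nx.1 + 1 ≤ q.2))).map (·.2)) :=
      (List.foldl_map (f := fun (nx : Int × Int) => nx.2) (g := fun (d : PySem.Dict Int Int) (x : Int) => d.insert x (d.getD x 0 + 1))).symm
    rw [hfil, hmap]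
    have hfe := filter_enumerate_range q.1 q.2 nums 0
    simp only [Nat.cast_zero, Nat.sub_zero] at hfe
    rw [hfe, List.drop_take,
      PySem.List.slice_toNat nums (le_max_right _ _) (le_max_right _ _)]
  rw [hdict]
  exact (count_values_eq_items k _).symm
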